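-- pv_equiv track=rewrite | github.com/FEDERICOMB96/pd1-tp1-fceia | problema_2.py | get_line_positions
-- ===== SOURCE A (Python) =====
-- def get_line_positions(line_detection_array):
--     positions = []
--     is_line = False
--     start = 0
--     for i, val in enumerate(line_detection_array):
--         if val and not is_line:
--             is_line = True
--             start = i
--         elif not val and is_line:
--             is_line = False
--             # Se toma el punto medio de la línea detectada
--             positions.append(start + (i - 1 - start) // 2)
--     return positions
-- ===== SOURCE B (Python) =====
-- def get_line_positions(line_detection_array):
--     # Build maximal runs of equal truthiness as [value, start, end] triples,
--     # then take midpoints of truthy runs, skipping the final run (a run that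
--     # reaches the end of the array is never recorded).
--     runs = []
--     for i, v in enumerate(line_detection_array):
--         v = bool(v)
--         if runs and runs[-1][0] == v:
--             runs[-1][2] = i
--         else:
--             runs.append([v, i, i])
--     return [s + (e - s) // 2 for k, s, e in runs[:-1] if k]
-- ===== Notes on version B (the rewrite author's own statement) =====
-- stated objective: alternative
-- what changed: Replaced the is_line/start boolean state machine with a run-length-encoding pass (maximal runs of equal truthiness) followed by a comprehension taking midpoints of truthy runs, dropping the final run.
import Mathlib
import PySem

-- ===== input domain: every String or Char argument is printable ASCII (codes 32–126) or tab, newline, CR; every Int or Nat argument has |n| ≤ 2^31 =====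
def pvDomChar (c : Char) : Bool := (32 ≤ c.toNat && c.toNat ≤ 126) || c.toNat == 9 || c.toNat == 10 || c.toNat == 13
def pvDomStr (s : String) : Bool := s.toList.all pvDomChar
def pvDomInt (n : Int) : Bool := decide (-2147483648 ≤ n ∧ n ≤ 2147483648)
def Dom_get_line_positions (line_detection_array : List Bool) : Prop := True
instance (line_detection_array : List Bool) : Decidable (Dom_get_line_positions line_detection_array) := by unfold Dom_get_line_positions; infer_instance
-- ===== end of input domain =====

-- B replaces A's is_line/start state machine by a run-length-encoding pass plus a
-- comprehension over the runs (objective: alternative decomposition, same cost).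

-- ===== PORT A =====
-- state = (positions, is_line, start); one fold step per (i, val) of enumerate
def pvAStep (st : List Int × Bool × Int) (p : Int × Bool) : List Int × Bool × Int :=
  if p.2 && !st.2.1 then (st.1, true, p.1)
  else if !p.2 && st.2.1 then
    (st.1 ++ [st.2.2 + PySem.Int.floordiv (p.1 - 1 - st.2.2) 2], false, st.2.2)
  else st

def get_line_positions (line_detection_array : List Bool) : List Int :=
  ((PySem.List.enumerate line_detection_array).foldl pvAStep ([], false, 0)).1

-- ===== PORT B =====
-- one step of the run-building loop: extend the last run or open a new one
def pvRunStep (runs : List (Bool × Int × Int)) (p : Int × Bool) : List (Bool × Int × Int) :=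
  match runs.getLast? with
  | some (k, s, _) =>
      if k == p.2 then runs.dropLast ++ [(k, s, p.1)] else runs ++ [(p.2, p.1, p.1)]
  | none => [(p.2, p.1, p.1)]

-- the final comprehension: midpoints of the truthy runs
def pvMids (rs : List (Bool × Int × Int)) : List Int :=
  (rs.filter (fun r => r.1)).map (fun r => r.2.1 + PySem.Int.floordiv (r.2.2 - r.2.1) 2)

def get_line_positions_alt (line_detection_array : List Bool) : List Int :=
  pvMids ((PySem.List.enumerate line_detection_array).foldl pvRunStep []).dropLast

-- ===== PRECONDITION & SPEC =====
def Spec_get_line_positions (line_detection_array : List Bool) (out : List Int) : Prop := out = get_line_positions_alt line_detection_array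
instance (line_detection_array : List Bool) (out : List Int) : Decidable (Spec_get_line_positions line_detection_array out) := by unfold Spec_get_line_positions; infer_instance

-- ===== CLAIM (what is proved, stated in full; the proofs are below) =====
def Claim_equal_get_line_positions : Prop := ∀ (line_detection_array : List Bool), Dom_get_line_positions line_detection_array → Spec_get_line_positions line_detection_array (get_line_positions line_detection_array)

-- ===== LEMMAS AND PROOFS =====

-- the invariant tying A's fold state to B's run list after the same prefix
def pvInv (n : Int) (pos : List Int) (il : Bool) (st : Int)
    (runs : List (Bool × Int × Int)) : Prop :=
  pos = pvMids runs.dropLast ∧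
  (runs.getLast? = none → il = false) ∧
  (∀ k s e, runs.getLast? = some (k, s, e) → il = k ∧ (k = true → st = s) ∧ e = n - 1)

lemma pvMids_concat (rs : List (Bool × Int × Int)) (r : Bool × Int × Int) :
    pvMids (rs ++ [r]) =
      pvMids rs ++ (if r.1 then [r.2.1 + PySem.Int.floordiv (r.2.2 - r.2.1) 2] else []) := by
  simp [pvMids, List.filter_append]
  by_cases h : r.1 <;> simp [h]

lemma pvInv_singleton (n : Int) (pos : List Int) (st : Int) (v : Bool)
    (h1 : pos = pvMids []) : pvInv (n + 1) pos v (if v then n else st) [(v, n, n)] := by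
  refine ⟨by simpa [pvMids] using h1, by simp, ?_⟩
  intro k s e hh
  simp only [List.getLast?_singleton, Option.some.injEq, Prod.mk.injEq] at hh
  obtain ⟨hk, hs, he⟩ := hh
  subst hk; subst hs; subst he
  exact ⟨rfl, fun hv => by simp [hv], by omega⟩

lemma pvInv_concat (n : Int) (pos : List Int) (st : Int)
    (rs : List (Bool × Int × Int)) (k : Bool) (s : Int)
    (h1 : pos = pvMids rs) (hst : k = true → st = s) :
    pvInv (n + 1) pos k st (rs ++ [(k, s, n)]) := by
  refine ⟨by rw [List.dropLast_concat]; exact h1, by simp, ?_⟩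
  intro k' s' e' hh
  rw [List.getLast?_concat] at hh
  simp only [Option.some.injEq, Prod.mk.injEq] at hh
  obtain ⟨hk, hs, he⟩ := hh
  subst hk; subst hs; subst he
  exact ⟨rfl, hst, by omega⟩

lemma pv_main (xs : List Bool) : ∀ (n : Int) (pos : List Int) (il : Bool) (st : Int)
    (runs : List (Bool × Int × Int)), pvInv n pos il st runs →
    ((PySem.List.enumerate xs n).foldl pvAStep (pos, il, st)).1
      = pvMids (((PySem.List.enumerate xs n).foldl pvRunStep runs).dropLast) := by
  induction xs with
  | nil => intro n pos il st runs h; exact h.1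
  | cons x xs ih =>
    intro n pos il st runs h
    obtain ⟨h1, h0, h2⟩ := h
    rcases runs.eq_nil_or_concat with hr | ⟨rs, ⟨k, s, e⟩, hr⟩
    · subst hr
      have hil : il = false := h0 rfl
      subst hil
      simp only [PySem.List.enumerate_cons, List.foldl_cons]
      cases x
      · -- x = false, runs = []
        rw [show pvAStep (pos, false, st) (n, false) = (pos, false, st) by
              simp [pvAStep]]
        rw [show pvRunStep [] (n, false) = [(false, n, n)] by simp [pvRunStep]]
        exact ih (n + 1) pos false st [(false, n, n)]
          (by simpa using pvInv_singleton n pos st false h1)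
      · -- x = true, runs = []
        rw [show pvAStep (pos, false, st) (n, true) = (pos, true, n) by simp [pvAStep]]
        rw [show pvRunStep [] (n, true) = [(true, n, n)] by simp [pvRunStep]]
        exact ih (n + 1) pos true n [(true, n, n)]
          (by simpa using pvInv_singleton n pos st true h1)
    · rw [List.concat_eq_append] at hr
      subst hr
      obtain ⟨hil, hst, he⟩ := h2 k s e List.getLast?_concat
      subst hil
      rw [List.dropLast_concat] at h1
      simp only [PySem.List.enumerate_cons, List.foldl_cons]
      by_cases hxk : x = il
      · -- same value: A's state unchanged, B extends the last run
        subst hxk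
        rw [show pvAStep (pos, x, st) (n, x) = (pos, x, st) by
              cases x <;> simp [pvAStep]]
        rw [show pvRunStep (rs ++ [(x, s, e)]) (n, x) = rs ++ [(x, s, n)] by
              simp [pvRunStep]]
        exact ih (n + 1) pos x st (rs ++ [(x, s, n)]) (pvInv_concat n pos st rs x s h1 hst)
      · rw [show pvRunStep (rs ++ [(il, s, e)]) (n, x)
              = (rs ++ [(il, s, e)]) ++ [(x, n, n)] by
              simp [pvRunStep]
              intro hc; exact absurd hc.symm hxk]
        cases x
        · -- x = false, il = true: A closes the run and records the midpoint
          have hk : il = true := by cases il <;> simp_all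
          subst hk
          rw [show pvAStep (pos, true, st) (n, false)
                = (pos ++ [st + PySem.Int.floordiv (n - 1 - st) 2], false, st) by
                simp [pvAStep]]
          refine ih (n + 1) _ false st _
            (pvInv_concat n _ st (rs ++ [(true, s, e)]) false n ?_ (by simp))
          rw [pvMids_concat]
          simp [h1, hst rfl, he, show n - 1 - s = e - s by omega]
        · -- x = true, il = false: A opens a new run
          have hk : il = false := by cases il <;> simp_all
          subst hk
          rw [show pvAStep (pos, false, st) (n, true) = (pos, true, n) by
                simp [pvAStep]]
          refine ih (n + 1) pos true n _
            (pvInv_concat n pos n (rs ++ [(false, s, e)]) true n ?_ (fun _ => rfl))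
          rw [pvMids_concat]
          simp [h1]

-- ===== VERDICT (by name: the statement is the Claim_ definition above) =====
theorem get_line_positions_spec : Claim_equal_get_line_positions := by
  intro xs _
  unfold Spec_get_line_positions get_line_positions get_line_positions_alt
  exact pv_main xs 0 [] false 0 [] ⟨rfl, fun _ => rfl, by simp⟩
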